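-- pv_equiv track=rewrite | github.com/amenciag-hash/118B-Final | make_charts.py | cummax
-- ===== SOURCE A (Python) =====
-- def cummax(xs):
--     out, m = [], None
--     for x in xs:
--         if x is None:
--             out.append(m)
--             continue
--         m = x if m is None else max(m, x)
--         out.append(m)
--     return out
-- ===== SOURCE B (Python) =====
-- def cummax(xs):
--     if len(xs) <= 1:
--         return list(xs)
--     mid = len(xs) // 2
--     left = cummax(xs[:mid])
--     right = cummax(xs[mid:])
--     m = left[-1]
--     if m is None:
--         return left + right
--     return left + [m if r is None else max(m, r) for r in right]
-- ===== Notes on version B (the rewrite author's own statement) =====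
-- stated objective: alternative
-- what changed: Replaces A's single left-to-right pass with a manually threaded running maximum by a divide-and-conquer recursion: cumulative maxima of each half are computed independently and the right half is then lifted by the left half's overall maximum (its last cumulative value).
import Mathlib
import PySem

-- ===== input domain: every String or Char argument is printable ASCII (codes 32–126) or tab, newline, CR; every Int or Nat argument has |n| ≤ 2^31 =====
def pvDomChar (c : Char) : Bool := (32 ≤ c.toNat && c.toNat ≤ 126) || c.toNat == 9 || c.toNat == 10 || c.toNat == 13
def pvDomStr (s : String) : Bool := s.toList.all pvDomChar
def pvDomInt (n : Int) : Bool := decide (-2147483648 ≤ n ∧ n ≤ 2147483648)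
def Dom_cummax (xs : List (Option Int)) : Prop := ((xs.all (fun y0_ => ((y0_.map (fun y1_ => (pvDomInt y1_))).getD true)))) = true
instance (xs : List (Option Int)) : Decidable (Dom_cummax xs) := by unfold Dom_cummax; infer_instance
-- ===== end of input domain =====

-- B replaces A's single pass with a manually threaded running maximum by a
-- divide-and-conquer recursion (halve, recurse, lift the right half by the left
-- half's last cumulative value) — alternative algorithm, same return value.

-- ===== PORT A =====
-- A: out, m = [], None; for x in xs: if x is None: append(m) else m := x if m is None else max(m,x); append(m)
def cummax (xs : List (Option Int)) : List (Option Int) :=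
  (xs.foldl
    (fun (s : List (Option Int) × Option Int) x =>
      match x with
      | none => (s.1 ++ [s.2], s.2)
      | some xv =>
        let m' : Option Int := some (match s.2 with | none => xv | some mv => max mv xv)
        (s.1 ++ [m'], m'))
    ([], none)).1

-- ===== PORT B =====
-- if len(xs) <= 1: return list(xs); mid = len(xs)//2; left = cummax(xs[:mid]);
-- right = cummax(xs[mid:]); m = left[-1]; if m is None: return left + right;
-- return left + [m if r is None else max(m, r) for r in right]
-- (xs[:mid]/xs[mid:] with 0 ≤ mid ≤ len are exactly take/drop; len//2 on a Nat is Nat division)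
def cummax_alt (xs : List (Option Int)) : List (Option Int) :=
  if _h : xs.length ≤ 1 then xs
  else
    let mid := xs.length / 2
    let left := cummax_alt (xs.take mid)
    let right := cummax_alt (xs.drop mid)
    match PySem.List.pyGet? left (-1) with    -- left[-1]; left is nonempty here (mid ≥ 1)
    | none => []                              -- unreachable guard (Python would raise IndexError)
    | some none => left ++ right
    | some (some mv) =>
        left ++ right.map (fun r => match r with | none => some mv | some rv => some (max mv rv))
termination_by xs.length
decreasing_by
  · simp only [List.length_take]; omega
  · simp only [List.length_drop]; omega

-- ===== PRECONDITION & SPEC =====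
def Spec_cummax (xs : List (Option Int)) (out : List (Option Int)) : Prop := out = cummax_alt xs
instance (xs : List (Option Int)) (out : List (Option Int)) : Decidable (Spec_cummax xs out) := by unfold Spec_cummax; infer_instance

-- ===== CLAIM (what is proved, stated in full; the proofs are below) =====
def Claim_equal_cummax : Prop := ∀ (xs : List (Option Int)), Dom_cummax xs → Spec_cummax xs (cummax xs)

-- ===== LEMMAS AND PROOFS =====

-- one max step, with an optional accumulator
def mstep (a : Option Int) (v : Int) : Option Int :=
  some (match a with | none => v | some m => max m v)

-- combine a running max with an optional value (A's loop body on one element)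
def omax (a b : Option Int) : Option Int :=
  match b with | none => a | some v => mstep a v

theorem omax_none_left (b : Option Int) : omax none b = b := by
  cases b <;> simp [omax, mstep]

theorem omax_assoc (a b c : Option Int) : omax (omax a b) c = omax a (omax b c) := by
  cases a <;> cases b <;> cases c <;> simp [omax, mstep, max_assoc]

-- the list A's loop appends for remaining input xs when the running max is m
def cummaxSpine (m : Option Int) (xs : List (Option Int)) : List (Option Int) :=
  match xs with
  | [] => []
  | x :: t =>
    let m' := omax m x
    m' :: cummaxSpine m' t

theorem cummax_foldl_spine (xs : List (Option Int)) :
    ∀ (out : List (Option Int)) (m : Option Int),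
    (xs.foldl
      (fun (s : List (Option Int) × Option Int) x =>
        match x with
        | none => (s.1 ++ [s.2], s.2)
        | some xv =>
          let m' : Option Int := some (match s.2 with | none => xv | some mv => max mv xv)
          (s.1 ++ [m'], m'))
      (out, m)).1 = out ++ cummaxSpine m xs := by
  induction xs with
  | nil => intro out m; simp [cummaxSpine]
  | cons x t ih =>
    intro out m
    cases x with
    | none => simp [List.foldl, cummaxSpine, omax, ih]
    | some xv => cases m <;> simp [List.foldl, cummaxSpine, omax, mstep, ih]

theorem cummax_eq_spine (xs : List (Option Int)) : cummax xs = cummaxSpine none xs := by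
  simpa using cummax_foldl_spine xs [] none

-- shifting the starting state maps omax m over the result
theorem spine_map (l : List (Option Int)) :
    ∀ m, cummaxSpine m l = (cummaxSpine none l).map (omax m) := by
  induction l with
  | nil => intro m; simp [cummaxSpine]
  | cons x t ih =>
    intro m
    simp only [cummaxSpine, List.map_cons, omax_none_left]
    refine List.cons_eq_cons.mpr ⟨rfl, ?_⟩
    rw [ih (omax m x), ih x, List.map_map]
    apply List.map_congr_left
    intro a _
    simp [Function.comp_apply, omax_assoc]

-- the spine of a concatenation splits at the left part's final running max
theorem spine_append (l1 : List (Option Int)) :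
    ∀ (l2 : List (Option Int)) (m : Option Int),
    cummaxSpine m (l1 ++ l2) = cummaxSpine m l1 ++ cummaxSpine (l1.foldl omax m) l2 := by
  induction l1 with
  | nil => intro l2 m; simp [cummaxSpine]
  | cons x t ih => intro l2 m; simp [cummaxSpine, ih, List.foldl]

-- the last cumulative value is the running max of the whole list
theorem getLast?_spine (l : List (Option Int)) :
    ∀ m, l ≠ [] → (cummaxSpine m l).getLast? = some (l.foldl omax m) := by
  induction l with
  | nil => intro m h; exact absurd rfl h
  | cons x t ih =>
    intro m _
    cases t with
    | nil => simp [cummaxSpine, List.foldl]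
    | cons y ts =>
      have := ih (omax m x) (by simp)
      simp only [cummaxSpine] at this ⊢
      rw [List.getLast?_cons_cons, this]
      simp [List.foldl]

theorem alt_eq_spine (xs : List (Option Int)) : cummax_alt xs = cummaxSpine none xs := by
  by_cases h : xs.length ≤ 1
  · rw [cummax_alt]
    simp only [h, dite_true]
    cases xs with
    | nil => rfl
    | cons x t =>
      cases t with
      | nil => simp [cummaxSpine, omax_none_left]
      | cons y ts => simp at h
  · rw [cummax_alt]
    simp only [h, dite_false]
    have hmid : 1 ≤ xs.length / 2 := by omega
    have htk : xs.take (xs.length / 2) ≠ [] := by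
      intro hn
      rcases List.take_eq_nil_iff.mp hn with h0 | h0
      · omega
      · rw [h0] at h; simp at h
    have ihl := alt_eq_spine (xs.take (xs.length / 2))
    have ihr := alt_eq_spine (xs.drop (xs.length / 2))
    rw [ihl, ihr, PySem.List.pyGet?_neg_one,
        getLast?_spine (xs.take (xs.length / 2)) none htk]
    have hsplit :
        cummaxSpine none xs =
          cummaxSpine none (xs.take (xs.length / 2)) ++
            cummaxSpine ((xs.take (xs.length / 2)).foldl omax none)
              (xs.drop (xs.length / 2)) := by
      conv_lhs => rw [← List.take_append_drop (xs.length / 2) xs]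
      exact spine_append _ _ none
    cases hm : (xs.take (xs.length / 2)).foldl omax none with
    | none => rw [hsplit, hm]
    | some mv =>
      rw [hsplit, hm, spine_map _ (some mv)]
      congr 1
termination_by xs.length
decreasing_by
  · simp only [List.length_take]; omega
  · simp only [List.length_drop]; omega

-- ===== VERDICT (by name: the statement is the Claim_ definition above) =====
theorem cummax_spec : Claim_equal_cummax := by
  intro xs _
  unfold Spec_cummax
  rw [cummax_eq_spine, alt_eq_spine]
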